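-- pv_equiv track=rewrite | github.com/hvariant/rosalind_sol | mprt.py | find_motif
-- ===== SOURCE A (Python) =====
-- import string
--
-- def find_motif(prot,motif):
--     def motif_len(motif):
--         r = 0
--         i = 0
--         while i < len(motif):
--             if motif[i] in string.ascii_letters:
--                 r += 1
--                 i += 1
--             else:
--                 r += 1
--                 i += 1
--                 while motif[i] in string.ascii_letters:
--                     i += 1
--                 i += 1
--
--         return r
--
--     def motif_match(motif,pos,amino):
--         if motif[pos] in string.ascii_letters:
--             return (motif[pos] == amino,pos+1)
--
--         left = motif[pos]
--         rpos = pos+1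
--         while motif[rpos] in string.ascii_letters:
--             rpos += 1
--
--         charset = motif[pos+1:rpos]
--         if left == "[":
--             return (amino in charset,rpos+1)
--         else:
--             return (not amino in charset,rpos+1)
--
--     ret = []
--     L = motif_len(motif)
--     for i in range(len(prot)-L):
--         pos = 0
--         success = True
--         for j in range(i,i+L):
--             r,pos = motif_match(motif,pos,prot[j])
--             if not r:
--                 success = False
--                 break
--
--         if success:
--             ret.append(i)
--
--
--     return ret
-- ===== SOURCE B (Python) =====
-- def _parse(motif):
--     # one-time parse of the motif into tokens: a literal letter, or
--     # (is_positive_bracket, charset) for a '[...]'/'{...}'-style group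
--     toks = []
--     i = 0
--     n = len(motif)
--     while i < n:
--         c = motif[i]
--         if c.isalpha():
--             toks.append(c)
--             i += 1
--         else:
--             j = i + 1
--             while j < n and motif[j].isalpha():
--                 j += 1
--             toks.append((c == '[', set(motif[i + 1:j])))
--             i = j + 1
--     return toks
--
--
-- def _matches(toks, window):
--     for t, a in zip(toks, window):
--         if isinstance(t, str):
--             if a != t:
--                 return False
--         elif (a in t[1]) != t[0]:
--             return False
--     return True
--
--
-- def find_motif(prot, motif):
--     toks = _parse(motif)
--     L = len(toks)
--     return [i for i in range(len(prot) - L)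
--             if _matches(toks, prot[i:i + L])]
-- ===== Notes on version B (the rewrite author's own statement) =====
-- stated objective: alternative
-- what changed: B parses the motif once into a list of token matchers (a literal char, or a positive/negative character set for a bracket group) and checks each candidate window with a flat zip comparison, instead of A's re-scanning of the motif's bracket groups character-by-character at every start position.
import Mathlib
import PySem

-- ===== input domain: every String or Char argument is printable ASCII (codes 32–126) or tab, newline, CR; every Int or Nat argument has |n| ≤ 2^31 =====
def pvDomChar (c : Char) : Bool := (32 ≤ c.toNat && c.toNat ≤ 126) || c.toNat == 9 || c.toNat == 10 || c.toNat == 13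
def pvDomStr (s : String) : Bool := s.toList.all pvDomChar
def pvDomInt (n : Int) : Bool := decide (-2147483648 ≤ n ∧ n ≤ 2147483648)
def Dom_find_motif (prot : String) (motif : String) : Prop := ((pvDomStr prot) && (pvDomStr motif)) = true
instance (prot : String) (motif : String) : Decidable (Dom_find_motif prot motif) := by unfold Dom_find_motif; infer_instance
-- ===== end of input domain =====

-- B parses the motif once into a token list and does a flat window comparison, instead of A's
-- per-position re-scanning of the motif's bracket groups; return value only, no argument is
-- mutated.

-- ===== PORT A =====
-- A's motif_len: the outer while over motif[i]; on the ASCII domain `c in string.ascii_letters`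
-- is Char.isAlpha.  The inner `while motif[i] in …` is the mutual helper (it skips the group's
-- letters, then the closing character).  Where Python A raises IndexError (the letters run off
-- the end) the helper just stops — those inputs are excluded by Pre_.
mutual
def pvLenA : List Char → Nat
  | [] => 0
  | c :: cs => if c.isAlpha then pvLenA cs + 1 else pvLenASkip cs + 1
def pvLenASkip : List Char → Nat
  | [] => 0
  | c :: cs => if c.isAlpha then pvLenASkip cs else pvLenA cs
end

-- A's motif_match(motif,pos,amino), carrying the motif suffix at `pos` instead of the index:
-- charset = motif[pos+1:rpos] is the takeWhile, the returned rpos+1 is the suffix after the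
-- group's letters and the closing character.
def pvMatchTok (m : List Char) (a : Char) : Bool × List Char :=
  match m with
  | [] => (false, [])   -- position past the end: Python would raise; unreachable under Pre_
  | c :: cs =>
    if c.isAlpha then (c == a, cs)
    else
      let charset := cs.takeWhile Char.isAlpha
      let rest := (cs.dropWhile Char.isAlpha).tail
      if c == '[' then (charset.contains a, rest) else (!(charset.contains a), rest)

-- A's inner `for j in range(i,i+L)` loop over the window characters prot[i..i+L-1].
def pvInnerA (w : List Char) (m : List Char) : Bool :=
  match w with
  | [] => true
  | a :: w' =>
    let rm := pvMatchTok m a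
    if rm.1 then pvInnerA w' rm.2 else false

def find_motif (prot : String) (motif : String) : List Int :=
  let ml := motif.toList
  let pl := prot.toList
  let L := pvLenA ml
  (List.range (pl.length - L)).foldl
    (fun ret i => if pvInnerA ((pl.drop i).take L) ml then ret ++ [(i : Int)] else ret) []

-- ===== PORT B =====
inductive PvTok where
  | lit (c : Char)
  | grp (inc : Bool) (s : PySem.Set Char)
  deriving DecidableEq, Repr

-- B's _parse: one upfront pass turning the motif into tokens; the group's charset is the slice
-- motif[i+1:j] (= takeWhile), pvParseSkip is the inner `while j < n and motif[j].isalpha()`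
-- scan followed by `i = j + 1`.
mutual
def pvParse : List Char → List PvTok
  | [] => []
  | c :: cs =>
    if c.isAlpha then .lit c :: pvParse cs
    else .grp (c == '[') (PySem.Set.ofList (cs.takeWhile Char.isAlpha)) :: pvParseSkip cs
def pvParseSkip : List Char → List PvTok
  | [] => []
  | c :: cs => if c.isAlpha then pvParseSkip cs else pvParse cs
end

def pvTokMatch (t : PvTok) (a : Char) : Bool :=
  match t with
  | .lit c => a == c
  | .grp inc s => PySem.Set.contains s a == inc

-- B's _matches: zip of tokens against the window, failing fast (zip stops at the shorter list).
def pvCheck : List PvTok → List Char → Bool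
  | [], _ => true
  | _, [] => true
  | t :: ts, a :: w => pvTokMatch t a && pvCheck ts w

def find_motif_alt (prot : String) (motif : String) : List Int :=
  let toks := pvParse motif.toList
  let pl := prot.toList
  let L := toks.length
  ((List.range (pl.length - L)).filter
      (fun i => pvCheck toks ((pl.drop i).take L))).map (Nat.cast : Nat → Int)

-- ===== PRECONDITION & SPEC =====
-- Pre_ excludes exactly the malformed motifs on which Python A raises IndexError (a bracket
-- group whose letters run to the end of the string, so it has no closing character): since
-- every bracket group consumes exactly two non-letter characters (its opener and its closer),
-- A returns normally iff the motif's number of non-letter characters is even.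
def Pre_find_motif (prot : String) (motif : String) : Prop :=
  motif.toList.countP (fun c => !c.isAlpha) % 2 = 0
instance (prot : String) (motif : String) : Decidable (Pre_find_motif prot motif) := by
  unfold Pre_find_motif; infer_instance

def pvWitness_find_motif : String × String := ("ACDEF", "C[DE]")

def Spec_find_motif (prot : String) (motif : String) (out : List Int) : Prop :=
  out = find_motif_alt prot motif
instance (prot : String) (motif : String) (out : List Int) :
    Decidable (Spec_find_motif prot motif out) := by
  unfold Spec_find_motif; infer_instance

-- ===== CLAIM =====
def Claim_equal_find_motif : Prop := ∀ (prot : String) (motif : String),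
  Dom_find_motif prot motif → Pre_find_motif prot motif →
    Spec_find_motif prot motif (find_motif prot motif)

-- ===== LEMMAS AND PROOFS =====

-- the mutual helpers, characterised through dropWhile/tail (the suffix after the group)
theorem pvLenASkip_eq : ∀ cs : List Char,
    pvLenASkip cs = pvLenA ((cs.dropWhile Char.isAlpha).tail) := by
  intro cs
  induction cs with
  | nil => rfl
  | cons c cs ih => by_cases hc : c.isAlpha <;> simp [pvLenASkip, hc, ih]

theorem pvParseSkip_eq : ∀ cs : List Char,
    pvParseSkip cs = pvParse ((cs.dropWhile Char.isAlpha).tail) := by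
  intro cs
  induction cs with
  | nil => rfl
  | cons c cs ih => by_cases hc : c.isAlpha <;> simp [pvParseSkip, hc, ih]

theorem pvParse_length : ∀ ml : List Char, (pvParse ml).length = pvLenA ml := by
  intro ml
  match ml with
  | [] => rfl
  | c :: cs =>
    by_cases hc : c.isAlpha
    · simp [pvParse, pvLenA, hc, pvParse_length cs]
    · simp [pvParse, pvLenA, hc, pvParseSkip_eq, pvLenASkip_eq,
        pvParse_length ((cs.dropWhile Char.isAlpha).tail)]
termination_by ml => ml.length
decreasing_by
  · simp
  · have h1 := List.length_dropWhile_le Char.isAlpha cs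
    have h2 := (cs.dropWhile Char.isAlpha).length_tail
    simp only [List.length_cons]; omega

theorem pvSet_ofList_contains (l : List Char) (a : Char) :
    PySem.Set.contains (PySem.Set.ofList l) a = l.contains a := by
  rw [Bool.eq_iff_iff, PySem.Set.contains_iff, PySem.Set.mem_ofList, List.contains_iff_mem]

theorem pvInnerA_eq_check : ∀ (w ml : List Char), w.length = (pvParse ml).length →
    pvInnerA w ml = pvCheck (pvParse ml) w := by
  intro w
  induction w with
  | nil =>
    intro ml h
    match hp : pvParse ml with
    | [] => rfl
    | _ :: _ => rw [hp] at h; simp at h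
  | cons a w ih =>
    intro ml h
    match ml with
    | [] => rw [show pvParse [] = [] from rfl] at h; simp at h
    | c :: cs =>
      by_cases hc : c.isAlpha
      · rw [show pvParse (c :: cs) = .lit c :: pvParse cs from by simp [pvParse, hc]] at h ⊢
        have h' : w.length = (pvParse cs).length := by simpa using h
        have hmt : pvMatchTok (c :: cs) a = (c == a, cs) := by simp [pvMatchTok, hc]
        simp only [pvInnerA, hmt]
        simp only [pvCheck, pvTokMatch, ih cs h']
        rw [show (a == c) = (c == a) from Bool.beq_comm]
        cases (c == a) <;> simp
      · rw [show pvParse (c :: cs)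
              = .grp (c == '[') (PySem.Set.ofList (cs.takeWhile Char.isAlpha))
                  :: pvParse ((cs.dropWhile Char.isAlpha).tail) from by
            simp [pvParse, hc, pvParseSkip_eq]] at h ⊢
        have h' : w.length = (pvParse ((cs.dropWhile Char.isAlpha).tail)).length := by
          simpa using h
        cases hbr : (c == '[')
        · have hmt : pvMatchTok (c :: cs) a
              = (!((cs.takeWhile Char.isAlpha).contains a), (cs.dropWhile Char.isAlpha).tail) := by
            simp [pvMatchTok, hc, hbr]
          simp only [pvInnerA, hmt]
          simp only [pvCheck, pvTokMatch, pvSet_ofList_contains, ih _ h']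
          cases (cs.takeWhile Char.isAlpha).contains a <;> simp
        · have hmt : pvMatchTok (c :: cs) a
              = ((cs.takeWhile Char.isAlpha).contains a, (cs.dropWhile Char.isAlpha).tail) := by
            simp [pvMatchTok, hc, hbr]
          simp only [pvInnerA, hmt]
          simp only [pvCheck, pvTokMatch, pvSet_ofList_contains, ih _ h']
          cases (cs.takeWhile Char.isAlpha).contains a <;> simp

-- A's fold, rewritten as filter-then-map over its range
theorem find_motif_as_filter (prot motif : String) :
    find_motif prot motif
      = ((List.range (prot.toList.length - pvLenA motif.toList)).filter
          (fun i => pvInnerA ((prot.toList.drop i).take (pvLenA motif.toList)) motif.toList)).map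
          (Nat.cast : Nat → Int) := by
  simp only [find_motif]
  rw [PySem.List.foldl_append_if]
  simp only [List.nil_append]

-- inside both ranges the window has exactly L characters, so A's and B's window tests agree
theorem pv_filter_eq (prot motif : String) :
    (List.range (prot.toList.length - pvLenA motif.toList)).filter
        (fun i => pvInnerA ((prot.toList.drop i).take (pvLenA motif.toList)) motif.toList)
      = (List.range (prot.toList.length - pvLenA motif.toList)).filter
        (fun i => pvCheck (pvParse motif.toList)
          ((prot.toList.drop i).take (pvLenA motif.toList))) := by
  apply List.filter_congr
  intro i hi
  have hi' := List.mem_range.mp hi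
  apply pvInnerA_eq_check
  rw [pvParse_length, List.length_take, List.length_drop]
  omega

-- ===== VERDICT =====
theorem find_motif_spec : Claim_equal_find_motif := by
  intro prot motif _hdom _hpre
  show find_motif prot motif = find_motif_alt prot motif
  rw [find_motif_as_filter]
  simp only [find_motif_alt, pvParse_length]
  rw [pv_filter_eq]
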